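-- pv_equiv track=rewrite | github.com/lexilei/Secret_Agent | ptool_framework/sandbox.py | _strip_decorator
-- ===== SOURCE A (Python) =====
-- def _strip_decorator(source: str, decorator_name: str) -> str:
--     """Remove ``@decorator_name(...)`` lines from function source.
--
--     Handles single-line ``@sandbox(...)`` and multi-line decorator calls
--     that span several lines with parentheses.
--     """
--     lines = source.split("\n")
--     result = []
--     skip = False
--     paren_depth = 0
--
--     for line in lines:
--         stripped = line.strip()
--
--         # Start of decorator to remove
--         if stripped.startswith(f"@{decorator_name}"):
--             skip = True
--             paren_depth += stripped.count("(") - stripped.count(")")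
--             if paren_depth <= 0:
--                 skip = False
--                 paren_depth = 0
--             continue
--
--         # Continuation of multi-line decorator
--         if skip:
--             paren_depth += stripped.count("(") - stripped.count(")")
--             if paren_depth <= 0:
--                 skip = False
--                 paren_depth = 0
--             continue
--
--         result.append(line)
--
--     return "\n".join(result)
-- ===== SOURCE B (Python) =====
-- def _strip_decorator(source: str, decorator_name: str) -> str:
--     """Remove ``@decorator_name(...)`` lines from function source.
--
--     Index-based rewrite: an outer loop over line positions; when a matching
--     decorator line is found, an inner loop consumes its continuation lines
--     while the running parenthesis depth stays positive.
--     """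
--     lines = source.split("\n")
--     pattern = "@" + decorator_name
--     result = []
--     i = 0
--     n = len(lines)
--     while i < n:
--         stripped = lines[i].strip()
--         if stripped.startswith(pattern):
--             depth = stripped.count("(") - stripped.count(")")
--             i += 1
--             while depth > 0 and i < n:
--                 s = lines[i].strip()
--                 depth += s.count("(") - s.count(")")
--                 i += 1
--         else:
--             result.append(lines[i])
--             i += 1
--     return "\n".join(result)
-- ===== Notes on version B (the rewrite author's own statement) =====
-- stated objective: alternative
-- what changed: Replaced A's single pass with persistent skip/paren_depth flags by an index-based outer loop plus a dedicated inner loop that consumes a multi-line decorator's continuation lines while the parenthesis depth stays positive.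
import Mathlib
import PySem

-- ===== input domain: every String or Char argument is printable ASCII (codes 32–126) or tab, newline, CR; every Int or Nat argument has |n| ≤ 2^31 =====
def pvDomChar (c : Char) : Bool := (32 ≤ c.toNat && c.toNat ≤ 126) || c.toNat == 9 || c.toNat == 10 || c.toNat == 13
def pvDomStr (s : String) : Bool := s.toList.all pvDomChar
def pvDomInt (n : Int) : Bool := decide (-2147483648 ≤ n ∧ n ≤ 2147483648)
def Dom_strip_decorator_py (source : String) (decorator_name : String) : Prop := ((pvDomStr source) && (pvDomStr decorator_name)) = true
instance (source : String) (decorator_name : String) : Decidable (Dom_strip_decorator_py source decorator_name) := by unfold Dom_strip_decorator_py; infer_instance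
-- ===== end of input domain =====

-- B replaces A's persistent skip/paren_depth flags by an index-style outer loop with an
-- inner loop that consumes a multi-line decorator's continuation lines (objective: alternative decomposition, same cost).
-- Both ports work on List Char (PySem.Chars is exact there); lines = source.split("\n").

-- ===== PORT A =====
-- one iteration of A's for-loop; state = (result, skip, paren_depth)
def pvAstep (pat : List Char) (st : List (List Char) × Bool × Int) (line : List Char) :
    List (List Char) × Bool × Int :=
  let stripped := PySem.Chars.strip line
  if PySem.Chars.startswith stripped pat then
    let d := st.2.2 + ((PySem.Chars.count stripped ['('] : Int) - (PySem.Chars.count stripped [')'] : Int))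
    if d ≤ 0 then (st.1, false, 0) else (st.1, true, d)
  else if st.2.1 then
    let d := st.2.2 + ((PySem.Chars.count stripped ['('] : Int) - (PySem.Chars.count stripped [')'] : Int))
    if d ≤ 0 then (st.1, false, 0) else (st.1, true, d)
  else
    (st.1 ++ [line], st.2.1, st.2.2)

def strip_decorator_py (source : String) (decorator_name : String) : String :=
  let lines := PySem.Chars.splitOn source.toList ['\n']
  let st := lines.foldl (pvAstep ('@' :: decorator_name.toList)) ([], false, 0)
  String.ofList (PySem.Chars.join ['\n'] st.1)

-- ===== PORT B =====
-- paren-depth delta of a line's stripped form: s.count("(") - s.count(")")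
def pvDiff (line : List Char) : Int :=
  let s := PySem.Chars.strip line
  (PySem.Chars.count s ['('] : Int) - (PySem.Chars.count s [')'] : Int)

-- B's inner while loop: consume lines while depth > 0
def pvDrop : Int → List (List Char) → List (List Char)
  | _, [] => []
  | d, l :: ls => if 0 < d then pvDrop (d + pvDiff l) ls else l :: ls

theorem pvDrop_length_le (d : Int) (ls : List (List Char)) : (pvDrop d ls).length ≤ ls.length := by
  induction ls generalizing d with
  | nil => simp [pvDrop]
  | cons l ls ih =>
    simp only [pvDrop]
    split
    · exact Nat.le_succ_of_le (ih _)
    · exact Nat.le_refl _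

-- B's outer while loop over line positions
def pvCollect (pat : List Char) : List (List Char) → List (List Char)
  | [] => []
  | l :: ls =>
    if PySem.Chars.startswith (PySem.Chars.strip l) pat then
      pvCollect pat (pvDrop (pvDiff l) ls)
    else
      l :: pvCollect pat ls
termination_by ls => ls.length
decreasing_by
  · exact Nat.lt_succ_of_le (pvDrop_length_le _ _)
  · exact Nat.lt_succ_self _

def strip_decorator_py_alt (source : String) (decorator_name : String) : String :=
  String.ofList (PySem.Chars.join ['\n']
    (pvCollect ('@' :: decorator_name.toList) (PySem.Chars.splitOn source.toList ['\n'])))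

-- ===== PRECONDITION & SPEC =====
def Spec_strip_decorator_py (source : String) (decorator_name : String) (out : String) : Prop := out = strip_decorator_py_alt source decorator_name
instance (source : String) (decorator_name : String) (out : String) : Decidable (Spec_strip_decorator_py source decorator_name out) := by unfold Spec_strip_decorator_py; infer_instance

-- ===== CLAIM (what is proved, stated in full; the proofs are below) =====
def Claim_equal_strip_decorator_py : Prop := ∀ (source : String) (decorator_name : String), Dom_strip_decorator_py source decorator_name → Spec_strip_decorator_py source decorator_name (strip_decorator_py source decorator_name)

-- ===== LEMMAS AND PROOFS =====

theorem pvDrop_nonpos (d : Int) (ls : List (List Char)) (h : ¬ 0 < d) : pvDrop d ls = ls := by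
  cases ls with
  | nil => rfl
  | cons l ls => simp [pvDrop, h]

-- while A is in skip mode with depth d > 0, its fold result is the fold from the clean
-- state over what B's inner loop leaves behind
theorem pvSkipLem (pat : List Char) (ls : List (List Char)) (res : List (List Char)) (d : Int)
    (hd : 0 < d) :
    (ls.foldl (pvAstep pat) (res, true, d)).1 =
    ((pvDrop d ls).foldl (pvAstep pat) (res, false, 0)).1 := by
  induction ls generalizing d with
  | nil => simp [pvDrop]
  | cons l ls ih =>
    have hstep : pvAstep pat (res, true, d) l =
        (if d + pvDiff l ≤ 0 then (res, false, 0) else (res, true, d + pvDiff l)) := by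
      simp only [pvAstep, pvDiff]
      split <;> rfl
    rw [List.foldl_cons, hstep]
    have hdrop : pvDrop d (l :: ls) = pvDrop (d + pvDiff l) ls := by
      simp [pvDrop, hd]
    rw [hdrop]
    by_cases hle : d + pvDiff l ≤ 0
    · rw [if_pos hle, pvDrop_nonpos _ _ (by omega)]
    · rw [if_neg hle]
      exact ih _ (by omega)

-- the main loop correspondence: A's fold from the clean state accumulates exactly B's lines
theorem pvMainLem (pat : List Char) (ls : List (List Char)) :
    ∀ res, (ls.foldl (pvAstep pat) (res, false, 0)).1 = res ++ pvCollect pat ls := by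
  induction hls : ls.length using Nat.strong_induction_on generalizing ls with
  | _ n ih =>
  cases ls with
  | nil => intro res; simp [pvCollect]
  | cons l ls =>
    intro res
    rw [List.foldl_cons]
    by_cases hsw : PySem.Chars.startswith (PySem.Chars.strip l) pat = true
    · have hstep : pvAstep pat (res, false, 0) l =
          (if (0 : Int) + pvDiff l ≤ 0 then (res, false, 0) else (res, true, 0 + pvDiff l)) := by
        simp only [pvAstep, pvDiff, hsw]
        rfl
      rw [hstep]
      have hcol : pvCollect pat (l :: ls) = pvCollect pat (pvDrop (pvDiff l) ls) := by
        rw [pvCollect, if_pos hsw]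
      rw [hcol]
      have hn : ls.length + 1 = n := by simpa using hls
      by_cases hle : (0 : Int) + pvDiff l ≤ 0
      · rw [if_pos hle, pvDrop_nonpos _ _ (by omega)]
        exact ih ls.length (by omega) ls rfl res
      · rw [if_neg hle, pvSkipLem pat ls res _ (by omega)]
        have h0 : (0 : Int) + pvDiff l = pvDiff l := by omega
        rw [h0]
        exact ih (pvDrop (pvDiff l) ls).length
          (by have := pvDrop_length_le (pvDiff l) ls; omega)
          (pvDrop (pvDiff l) ls) rfl res
    · have hstep : pvAstep pat (res, false, 0) l = (res ++ [l], false, 0) := by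
        simp only [pvAstep]
        rw [if_neg hsw]
        rfl
      rw [hstep]
      have hcol : pvCollect pat (l :: ls) = l :: pvCollect pat ls := by
        rw [pvCollect, if_neg hsw]
      have hn : ls.length + 1 = n := by simpa using hls
      rw [hcol, ih ls.length (by omega) ls rfl (res ++ [l])]
      simp

-- ===== VERDICT (by name: the statement is the Claim_ definition above) =====
theorem strip_decorator_py_spec : Claim_equal_strip_decorator_py := by
  intro source decorator_name _
  unfold Spec_strip_decorator_py strip_decorator_py strip_decorator_py_alt
  simp only [pvMainLem, List.nil_append]
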